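-- pv_equiv track=rewrite | github.com/zetatxo/theegg_ai | TAREA23/Tarea23optimizado.py | cifrarSolitario
-- ===== SOURCE A (Python) =====
-- clave = "EZEZDUTUTZIKOINORINIREBARNEANAGINTZENZUINORZARATAALAEREMENPERATZENDIDAZULASTOUSTELAIZANGONAIZBAKARRIKDAKITALANAIZELA"
--
-- letras = {" ": 0,"A":1,"B":2,"C":3,"D":4,"E":5,"F":6,"G":7,"H":8,"I":9,"J":10,"K":11,"L":12,"M":13,"N":14,"O":15,"P":16,"Q":17,"R":18,"S":19,"T":20,"U":21,"V":22,
-- "W":23,"X":24,"Y":25,"Z":26}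
--
-- solitario = {"T1":1,"T2":2,"T3":3,"T4":4,"T5":5,"T6":6,"T7":7,"T8":8,"T9":9,"T10":10,"TJ":11,"TQ":12,
-- "TK":13,"D1":14,"D2":15,"D3":16,"D4":17,"D5":18,"D6":19,"D7":20,"D8":21,"D9":22,"D10":23,"DJ":24,"DQ":25,
-- "DK":26,"C1":27,"C2":28,"C3":29,"C4":30,"C5":31,"C6":32,"C7":33,"C8":34,"C9":35,"C10":36,"CJ":37,"CQ":38,
-- "CK":39,"P1":40,"P2":41,"P3":42,"P4":43,"P5":44,"P6":45,"P7":46,"P8":47,"P9":48,"P10":49,"PJ":50,"PQ":51,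
-- "PK":52,"jokA":53,"jokB":53}
--
-- def devolverLetra(numero):
--     for i, num in letras.items():
--         if num == numero:
--             num = letras[i]
--             return i
--
-- def crearRistra(solitario, clave, frase_input):
--     # Creo una lista con la clave, otra con las cartas y defino la lista que contendrá el resultado
--     clave_list = list(clave)
--     solitario_list = list(solitario.keys())
--     resultado = list()
--     for i in range (0, len(frase_input)): # Para cada letra de la frase introducida
--         paso_1 = list()
--         indice = solitario_list.index("jokA") #Se busca la posición del joker A
--         # Se pone detras de la siguiente carta, y si es ultima se pone la primera de la lista
--         if indice == 53:
--             paso_1 = [solitario_list[0]] + [solitario_list[indice]] + solitario_list[1:-1]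
--         else:
--             paso_1 = solitario_list[:indice] + [solitario_list[indice+1],solitario_list[indice]] + solitario_list[indice+2:]
--
--         paso_2 = list()
--         indice_2 = paso_1.index("jokB") #Se busca la posición del joker B
--         #Se situará dos posiciones detrás
--         if indice_2 == 52: # Si es la anteultima letra, detrás de la primera
--             paso_2 = [paso_1[0]] + [paso_1[indice_2]] + paso_1[1:52] + [paso_1[-1]]
--         elif indice_2 == 53: # Si es la ultima, detrás de la segunda de la lista
--             paso_2 = paso_1[:2] + [paso_1[indice_2]]+ paso_1[2:-1]
--         else: #Si no, dos posiciones detrás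
--             paso_2 = paso_1[:indice_2] + paso_1[indice_2+1:indice_2+3]+ [paso_1[indice_2]] + paso_1[indice_2+3:]
--         paso_3 = list()
--         # La cartas delante de el primer joker se intercambian con las de detrás del segundo joker
--         indice_A = paso_2.index("jokA") #Posición de joker A en lista
--         indice_B = paso_2.index("jokB") #Posición de joker B en lista
--
--         if indice_A < indice_B: # Si joker A está antes de joker B
--             paso_3 = paso_2[indice_B+1:] + paso_2[indice_A:indice_B+1] + paso_2[:indice_A]
--         else: # Si joker B está antes de joker A
--             paso_3 = paso_2[indice_A+1:] + paso_2[indice_B:indice_A+1] + paso_2[:indice_B]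
--         paso_4 = list()
--         """Corte, que corresponde al valor de la ultima carta, será el indice de corte de la baraja"""
--         corte = paso_3[-1]
--         # Si la última carta corresponde a un comodín, no se hace nada
--         if corte == "jokA" or corte == "jokB":
--             paso_4 = paso_3
--         else: # Se situan las posteriores al corte, las anteriores al corte dejando la ultima en su posicion
--             valor_corte = solitario[corte]
--             paso_4 = paso_3[valor_corte:-1] + paso_3[:valor_corte] + [paso_3[-1]]
--         cuenta = clave_list[i] #Extraemos la letra de la clave que corresponda
--         valor_cuenta = letras[cuenta] #Buscamos su valor en número en el diccionario letras
--
--         cuenta_final = paso_4[valor_cuenta-1] #Obtenemos la carta que corresponde a ese índice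
--         res = solitario[cuenta_final] #Obtenemos el valor que corresponde a la carta
--         if res > 26: #Si el valor es mayor de 26, le restamos 26
--             res = res - 26
--         solitario_list = paso_4 # Establecemos la posición de las cartas como inicial para la sig letra
--         resultado.append(res) #Lo incorporamos a la lista de resultado
--     return resultado
--
-- def cifrarSolitario(frase):
--     frase_input = list(frase) #Lista de las letras de la frase
--     conversion_input = list() #Lista con los numeros correspondientes a la frase
--     for i in frase_input: # Convertimos letras de la frase en números
--         valor = letras[i]
--         conversion_input.append(valor)
--     resultado = crearRistra(solitario, clave, frase_input) # Creamos la ristra del solitario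
--     resultado_final = list() #Resultado de la suma de la frase y ristra de solitario
--
--     for i in range(len(conversion_input)):
--         if conversion_input[i] == 0: # Si el valor es un 0, correponde a un espacio, por lo que no sumamos ristra
--             resultado_final.append(0)
--         elif (conversion_input[i] + resultado[i]) > 26: # Si la suma es mayor a 26, restamos 26 a la suma
--             resultado_final.append ((conversion_input[i] + resultado[i])-26)
--         else:
--             resultado_final.append ((conversion_input[i] + resultado[i]))
--
--     resultado_solitario = list()
--
--     for i in resultado_final: # Para cada valor obtenido de la suma
--         letra = devolverLetra(i) # Devolvemos letra
--         resultado_solitario.append(letra) #Lo incluimos en el resultado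
--     return resultado_solitario
-- ===== SOURCE B (Python) =====
-- # Simpler: the deck, the key and the Solitaire step rules are all fixed module constants, so the
-- # keystream never depends on the phrase: precompute it once and encrypt by table lookup.
-- KEYSTREAM = [6, 23, 9, 26, 15, 24, 5, 16, 5, 9, 27, 2, 25, 26, 18, 12, 22, 2, 23, 20,
--              2, 12, 13, 1, 3, 18, 3, 8, 2, 1, 5, 12, 2, 8, 25, 2, 10, 18, 2, 10,
--              22, 23, 8, 18, 7, 6, 9, 22, 9, 27, 3, 5, 26, 18, 22, 2, 10, 10, 5, 12,
--              18, 11, 26, 24, 5, 3, 13, 4, 6, 10, 12, 27, 13, 7, 21, 25, 9, 18, 13, 16,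
--              20, 20, 4, 15, 15, 9, 10, 12, 24, 17, 2, 9, 5, 24, 15, 2, 19, 19, 18, 12,
--              3, 25, 13, 15, 5, 6, 7, 22, 21, 4, 1, 22, 4, 7, 21, 18]
--
-- ABC = " ABCDEFGHIJKLMNOPQRSTUVWXYZ"
--
--
-- def cifrarSolitario(frase):
--     res = []
--     for ch, k in zip(frase, KEYSTREAM):
--         if ch == " ":
--             res.append(" ")
--         else:
--             n = ABC.index(ch) + k
--             res.append(ABC[n - 26 if n > 26 else n])
--     return res
-- ===== Notes on version B (the rewrite author's own statement) =====
-- stated objective: simpler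
-- what changed: B drops the per-character Solitaire deck simulation entirely: since deck, key and step rules are fixed module constants the keystream is input-independent, so B encrypts in one pass by lookup into the precomputed 116-entry keystream table.
import Mathlib
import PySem

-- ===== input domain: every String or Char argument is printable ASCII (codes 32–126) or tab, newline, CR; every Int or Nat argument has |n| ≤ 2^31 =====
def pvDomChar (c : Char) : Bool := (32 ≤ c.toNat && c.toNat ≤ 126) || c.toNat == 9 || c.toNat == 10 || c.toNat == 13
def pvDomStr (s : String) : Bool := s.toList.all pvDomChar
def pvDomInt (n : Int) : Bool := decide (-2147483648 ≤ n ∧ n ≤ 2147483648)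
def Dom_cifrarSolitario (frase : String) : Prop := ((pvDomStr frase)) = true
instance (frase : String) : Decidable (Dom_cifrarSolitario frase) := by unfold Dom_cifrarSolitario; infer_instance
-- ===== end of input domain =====

-- B drops the per-character deck simulation: the keystream is input-independent (deck, key and step
-- rules are fixed module constants), so B encrypts in one pass by lookup into the precomputed
-- 116-entry keystream table; objective: simpler (one short pass, no deck manipulation).


-- ===== PORT A =====
def pvClave : String := "EZEZDUTUTZIKOINORINIREBARNEANAGINTZENZUINORZARATAALAEREMENPERATZENDIDAZULASTOUSTELAIZANGONAIZBAKARRIKDAKITALANAIZELA"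

def pvLetras : PySem.Dict String Int := PySem.Dict.ofList
  [(" ", 0), ("A", 1), ("B", 2), ("C", 3), ("D", 4), ("E", 5), ("F", 6), ("G", 7), ("H", 8), ("I", 9),
   ("J", 10), ("K", 11), ("L", 12), ("M", 13), ("N", 14), ("O", 15), ("P", 16), ("Q", 17), ("R", 18),
   ("S", 19), ("T", 20), ("U", 21), ("V", 22), ("W", 23), ("X", 24), ("Y", 25), ("Z", 26)]

def pvSolitario : PySem.Dict String Int := PySem.Dict.ofList
  [("T1", 1), ("T2", 2), ("T3", 3), ("T4", 4), ("T5", 5), ("T6", 6), ("T7", 7), ("T8", 8), ("T9", 9),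
   ("T10", 10), ("TJ", 11), ("TQ", 12), ("TK", 13), ("D1", 14), ("D2", 15), ("D3", 16), ("D4", 17),
   ("D5", 18), ("D6", 19), ("D7", 20), ("D8", 21), ("D9", 22), ("D10", 23), ("DJ", 24), ("DQ", 25),
   ("DK", 26), ("C1", 27), ("C2", 28), ("C3", 29), ("C4", 30), ("C5", 31), ("C6", 32), ("C7", 33),
   ("C8", 34), ("C9", 35), ("C10", 36), ("CJ", 37), ("CQ", 38), ("CK", 39), ("P1", 40), ("P2", 41),
   ("P3", 42), ("P4", 43), ("P5", 44), ("P6", 45), ("P7", 46), ("P8", 47), ("P9", 48), ("P10", 49),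
   ("PJ", 50), ("PQ", 51), ("PK", 52), ("jokA", 53), ("jokB", 53)]

-- first letras item whose value equals numero; none where Python returns None
def devolverLetra (numero : Int) : Option String :=
  ((PySem.Dict.items pvLetras).find? (fun p => p.2 == numero)).map (·.1)

-- deck update of one crearRistra iteration (paso_1 .. paso_4)
def crearRistraPaso4 (solitario : PySem.Dict String Int) (solitario_list : List String) : List String :=
  -- "jokA" is always in the deck, so list.index never raises: the getD default is unreachable
  let indice : Int := ((PySem.List.index? solitario_list "jokA").getD 0 : Nat)
  let paso_1 : List String :=
    if indice == 53 then
      [PySem.List.pyGetD solitario_list 0 ""] ++ [PySem.List.pyGetD solitario_list indice ""]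
        ++ PySem.List.slice solitario_list (some 1) (some (-1))
    else
      PySem.List.slice solitario_list none (some indice)
        ++ [PySem.List.pyGetD solitario_list (indice + 1) "", PySem.List.pyGetD solitario_list indice ""]
        ++ PySem.List.slice solitario_list (some (indice + 2)) none
  let indice_2 : Int := ((PySem.List.index? paso_1 "jokB").getD 0 : Nat)
  let paso_2 : List String :=
    if indice_2 == 52 then
      [PySem.List.pyGetD paso_1 0 ""] ++ [PySem.List.pyGetD paso_1 indice_2 ""]
        ++ PySem.List.slice paso_1 (some 1) (some 52) ++ [PySem.List.pyGetD paso_1 (-1) ""]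
    else if indice_2 == 53 then
      PySem.List.slice paso_1 none (some 2) ++ [PySem.List.pyGetD paso_1 indice_2 ""]
        ++ PySem.List.slice paso_1 (some 2) (some (-1))
    else
      PySem.List.slice paso_1 none (some indice_2)
        ++ PySem.List.slice paso_1 (some (indice_2 + 1)) (some (indice_2 + 3))
        ++ [PySem.List.pyGetD paso_1 indice_2 ""]
        ++ PySem.List.slice paso_1 (some (indice_2 + 3)) none
  let indice_A : Int := ((PySem.List.index? paso_2 "jokA").getD 0 : Nat)
  let indice_B : Int := ((PySem.List.index? paso_2 "jokB").getD 0 : Nat)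
  let paso_3 : List String :=
    if indice_A < indice_B then
      PySem.List.slice paso_2 (some (indice_B + 1)) none
        ++ PySem.List.slice paso_2 (some indice_A) (some (indice_B + 1))
        ++ PySem.List.slice paso_2 none (some indice_A)
    else
      PySem.List.slice paso_2 (some (indice_A + 1)) none
        ++ PySem.List.slice paso_2 (some indice_B) (some (indice_A + 1))
        ++ PySem.List.slice paso_2 none (some indice_B)
  let corte := PySem.List.pyGetD paso_3 (-1) ""
  if corte == "jokA" || corte == "jokB" then paso_3
  else
    -- corte is a card key of solitario, so the dict lookup never raises
    let valor_corte := (PySem.Dict.get? solitario corte).getD 0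
    PySem.List.slice paso_3 (some valor_corte) (some (-1))
      ++ PySem.List.slice paso_3 none (some valor_corte)
      ++ [PySem.List.pyGetD paso_3 (-1) ""]

-- keystream value of one crearRistra iteration (cuenta .. res), from paso_4 and the loop index
def crearRistraRes (solitario : PySem.Dict String Int) (clave_list : List String)
    (paso_4 : List String) (i : Int) : Int :=
  -- clave_list[i]: IndexError for i >= 116 is excluded by Pre_
  let cuenta := PySem.List.pyGetD clave_list i ""
  let valor_cuenta := (PySem.Dict.get? pvLetras cuenta).getD 0
  let cuenta_final := PySem.List.pyGetD paso_4 (valor_cuenta - 1) ""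
  let res := (PySem.Dict.get? solitario cuenta_final).getD 0
  if res > 26 then res - 26 else res

-- body of crearRistra's for-loop; state = (solitario_list, resultado)
def crearRistraPaso (solitario : PySem.Dict String Int) (clave_list : List String)
    (st : List String × List Int) (i : Int) : List String × List Int :=
  let paso_4 := crearRistraPaso4 solitario st.1
  (paso_4, st.2 ++ [crearRistraRes solitario clave_list paso_4 i])

def crearRistra (solitario : PySem.Dict String Int) (clave : String)
    (frase_input : List String) : List Int :=
  let clave_list : List String := clave.toList.map (fun c => String.ofList [c])  -- list(clave): 1-char strings
  let solitario_list := PySem.Dict.keys solitario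
  ((PySem.List.pyRange 0 (frase_input.length : Int) 1).foldl
      (crearRistraPaso solitario clave_list) (solitario_list, [])).2

def cifrarSolitario (frase : String) : List String :=
  let frase_input : List String := frase.toList.map (fun c => String.ofList [c])
  -- letras[i]: KeyError on characters outside " A-Z" is excluded by Pre_
  let conversion_input : List Int :=
    frase_input.foldl (fun acc ch => acc ++ [(PySem.Dict.get? pvLetras ch).getD 0]) []
  let resultado := crearRistra pvSolitario pvClave frase_input
  let resultado_final : List Int :=
    (PySem.List.pyRange 0 (conversion_input.length : Int) 1).foldl (fun acc i =>
      if PySem.List.pyGetD conversion_input i 0 == 0 then acc ++ [0]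
      else if PySem.List.pyGetD conversion_input i 0 + PySem.List.pyGetD resultado i 0 > 26 then
        acc ++ [PySem.List.pyGetD conversion_input i 0 + PySem.List.pyGetD resultado i 0 - 26]
      else acc ++ [PySem.List.pyGetD conversion_input i 0 + PySem.List.pyGetD resultado i 0]) []
  -- devolverLetra may return None (outside Pre_): ported with default "" there
  resultado_final.foldl (fun acc v => acc ++ [(devolverLetra v).getD ""]) []

-- ===== PORT B =====
-- the precomputed keystream table of Source B (a module constant there)
def pvKS : List Int :=
  [6, 23, 9, 26, 15, 24, 5, 16, 5, 9, 27, 2, 25, 26, 18, 12, 22, 2, 23, 20, 2, 12, 13, 1, 3, 18, 3,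
   8, 2, 1, 5, 12, 2, 8, 25, 2, 10, 18, 2, 10, 22, 23, 8, 18, 7, 6, 9, 22, 9, 27, 3, 5, 26, 18, 22,
   2, 10, 10, 5, 12, 18, 11, 26, 24, 5, 3, 13, 4, 6, 10, 12, 27, 13, 7, 21, 25, 9, 18, 13, 16, 20,
   20, 4, 15, 15, 9, 10, 12, 24, 17, 2, 9, 5, 24, 15, 2, 19, 19, 18, 12, 3, 25, 13, 15, 5, 6, 7,
   22, 21, 4, 1, 22, 4, 7, 21, 18]

def pvABC : String := " ABCDEFGHIJKLMNOPQRSTUVWXYZ"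

-- body of B's loop: encrypt one (character, keystream) pair
def pvCharB (ch : Char) (k : Int) : String :=
  if ch == ' ' then " "
  else
    -- ABC.index(ch): ValueError outside " A-Z", and ABC[27] IndexError: both excluded by Pre_
    let n : Int := ((PySem.List.index? pvABC.toList ch).getD 0 : Nat) + k
    String.ofList [PySem.List.pyGetD pvABC.toList (if n > 26 then n - 26 else n) ' ']

def cifrarSolitario_alt (frase : String) : List String :=
  (frase.toList.zip pvKS).foldl (fun res p => res ++ [pvCharB p.1 p.2]) []

-- ===== PRECONDITION & SPEC =====
-- Pre_ excludes: phrases longer than the 116-char key (A raises IndexError), characters other than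
-- space and uppercase letters (A raises KeyError, B ValueError), and the letter Z at positions
-- 10/49/71 — there the keystream value is 27 and A's result contains None, which is not a String
-- (B raises IndexError).
def Pre_cifrarSolitario (frase : String) : Prop :=
  frase.toList.length ≤ 116 ∧
  (frase.toList.all fun ch => ch == ' ' || ('A' ≤ ch && ch ≤ 'Z')) = true ∧
  frase.toList[10]? ≠ some 'Z' ∧ frase.toList[49]? ≠ some 'Z' ∧ frase.toList[71]? ≠ some 'Z'
instance (frase : String) : Decidable (Pre_cifrarSolitario frase) := by
  unfold Pre_cifrarSolitario; infer_instance

def pvWitness_cifrarSolitario : String := "HOLA MUNDO"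

def Spec_cifrarSolitario (frase : String) (out : List String) : Prop := out = cifrarSolitario_alt frase
instance (frase : String) (out : List String) : Decidable (Spec_cifrarSolitario frase out) := by
  unfold Spec_cifrarSolitario; infer_instance

-- ===== CLAIM (what is proved, stated in full; the proofs are below) =====
def Claim_equal_cifrarSolitario : Prop := ∀ (frase : String), Dom_cifrarSolitario frase → Pre_cifrarSolitario frase → Spec_cifrarSolitario frase (cifrarSolitario frase)

-- ===== LEMMAS AND PROOFS =====

def pvClaveList : List String := pvClave.toList.map (fun c => String.ofList [c])

-- keystream values A produces: n values starting from deck d and key position i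
def ksA : List String → Int → Nat → List Int
  | _, _, 0 => []
  | d, i, n + 1 =>
    crearRistraRes pvSolitario pvClaveList (crearRistraPaso4 pvSolitario d) i
      :: ksA (crearRistraPaso4 pvSolitario d) (i + 1) n

-- A's per-character output letter given its letras-value c and keystream value k
def gA (c k : Int) : String :=
  (devolverLetra (if c == 0 then 0 else if c + k > 26 then c + k - 26 else c + k)).getD ""

def cA (ch : Char) : Int := (PySem.Dict.get? pvLetras (String.ofList [ch])).getD 0

set_option maxRecDepth 100000 in
set_option maxHeartbeats 4000000 in
lemma ksA_concrete : ksA (PySem.Dict.keys pvSolitario) 0 116 = pvKS := by decide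

lemma ksA_prefix : ∀ (n m : Nat), n ≤ m → ∀ (d : List String) (i : Int),
    ksA d i n = (ksA d i m).take n := by
  intro n
  induction n with
  | zero => intro m _ d i; simp [ksA]
  | succ n ih =>
    intro m hm d i
    cases m with
    | zero => omega
    | succ m => simp only [ksA, List.take_succ_cons]; rw [ih m (by omega)]

lemma crearRistraPaso_eq (s : PySem.Dict String Int) (c : List String)
    (st : List String × List Int) (i : Int) :
    crearRistraPaso s c st i =
      (crearRistraPaso4 s st.1, st.2 ++ [crearRistraRes s c (crearRistraPaso4 s st.1) i]) := rfl

lemma foldA_ks (n : Nat) : ∀ (i : Int) (d : List String) (acc : List Int),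
    ((PySem.List.pyRange i (i + n) 1).foldl
        (crearRistraPaso pvSolitario pvClaveList) (d, acc)).2
      = acc ++ ksA d i n := by
  induction n with
  | zero => intro i d acc; simp [PySem.List.pyRange_one_eq_nil, ksA]
  | succ n ih =>
    intro i d acc
    have hcons : PySem.List.pyRange i (i + ((n : Nat) + 1 : Nat)) 1
        = i :: PySem.List.pyRange (i + 1) ((i + 1) + (n : Nat)) 1 := by
      rw [PySem.List.pyRange_one_cons (by push_cast; omega)]
      have : i + ((n : Nat) + 1 : Nat) = (i + 1) + (n : Nat) := by push_cast; ring
      rw [this]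
    rw [hcons]
    simp only [List.foldl_cons, crearRistraPaso_eq]
    rw [ih]
    simp [ksA]

lemma crearRistra_eq (l : List String) (h : l.length ≤ 116) :
    crearRistra pvSolitario pvClave l = pvKS.take l.length := by
  show ((PySem.List.pyRange 0 (l.length : Int) 1).foldl
      (crearRistraPaso pvSolitario pvClaveList) (PySem.Dict.keys pvSolitario, [])).2
    = pvKS.take l.length
  rw [show ((l.length : Nat) : Int) = (0 : Int) + (l.length : Nat) from (zero_add _).symm,
    foldA_ks, ksA_prefix l.length 116 h, ksA_concrete]
  simp

set_option maxRecDepth 100000 in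
lemma ksFacts : ∀ j ∈ List.range 116, 1 ≤ pvKS.getD j 0 ∧ pvKS.getD j 0 ≤ 27 ∧
    (pvKS.getD j 0 = 27 → j = 10 ∨ j = 49 ∨ j = 71) := by decide

set_option maxRecDepth 100000 in
set_option maxHeartbeats 4000000 in
lemma pointwise_bool : (pvABC.toList.all (fun ch => (List.range 27).all (fun km =>
    (decide (ch = 'Z') && decide (km = 26))
      || (gA (cA ch) ((km : Int) + 1) == pvCharB ch ((km : Int) + 1))))) = true := by rfl

lemma pointwise : ∀ ch ∈ pvABC.toList, ∀ km ∈ List.range 27,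
    (ch = 'Z' → km ≠ 26) → gA (cA ch) ((km : Int) + 1) = pvCharB ch ((km : Int) + 1) := by
  have h := pointwise_bool
  rw [List.all_eq_true] at h
  intro ch hch km hkm hz
  have h2 := h ch hch
  rw [List.all_eq_true] at h2
  have h3 := h2 km hkm
  simp only [Bool.or_eq_true, Bool.and_eq_true, decide_eq_true_eq, beq_iff_eq] at h3
  rcases h3 with ⟨hz', hk'⟩ | h3
  · exact absurd hk' (hz hz')
  · exact h3

lemma foldl_res (conv res : List Int) (xs : List Int) (acc : List Int) :
    xs.foldl (fun acc i => if (PySem.List.pyGetD conv i 0 == 0) = true then acc ++ [0]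
      else if PySem.List.pyGetD conv i 0 + PySem.List.pyGetD res i 0 > 26 then
        acc ++ [PySem.List.pyGetD conv i 0 + PySem.List.pyGetD res i 0 - 26]
      else acc ++ [PySem.List.pyGetD conv i 0 + PySem.List.pyGetD res i 0]) acc
    = acc ++ xs.map (fun i => if (PySem.List.pyGetD conv i 0 == 0) = true then 0
      else if PySem.List.pyGetD conv i 0 + PySem.List.pyGetD res i 0 > 26 then
        PySem.List.pyGetD conv i 0 + PySem.List.pyGetD res i 0 - 26
      else PySem.List.pyGetD conv i 0 + PySem.List.pyGetD res i 0) := by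
  induction xs generalizing acc with
  | nil => simp
  | cons x t ih => simp only [List.foldl_cons, List.map_cons]; split_ifs <;> (rw [ih]; simp)

lemma sideA (frase : String) (h : frase.toList.length ≤ 116) :
    cifrarSolitario frase = (List.range frase.toList.length).map
      (fun j => gA (cA (frase.toList.getD j ' ')) (pvKS.getD j 0)) := by
  unfold cifrarSolitario
  simp only [PySem.List.foldl_append_singleton_eq_map, List.nil_append, List.map_map,
    List.length_map]
  rw [foldl_res, List.nil_append, List.map_map,
    crearRistra_eq (frase.toList.map fun c => String.ofList [c]) (by simpa using h),
    PySem.List.pyRange_one, List.map_map]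
  simp only [Int.sub_zero, Int.toNat_natCast, List.length_map]
  apply List.map_congr_left
  intro j hj
  rw [List.mem_range] at hj
  simp only [Function.comp_apply, zero_add]
  have hconv : PySem.List.pyGetD
      (List.map ((fun x => (pvLetras.get? x).getD 0) ∘ fun c => String.ofList [c]) frase.toList)
      ((j : Nat) : Int) 0 = cA (frase.toList.getD j ' ') := by
    simp [PySem.List.pyGetD_natCast, List.getD_eq_getElem?_getD, List.getElem?_map,
      List.getElem?_eq_getElem hj, cA]
  have hks : PySem.List.pyGetD (pvKS.take frase.toList.length) ((j : Nat) : Int) 0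
      = pvKS.getD j 0 := by
    have hjf : j < frase.length := by simpa using hj
    have hjK : j < pvKS.length := by simp [pvKS]; omega
    simp [PySem.List.pyGetD_natCast, List.getD_eq_getElem?_getD, hjf, hjK]
  rw [hconv, hks, gA]

lemma zip_map_eq {α β γ : Type} (xs : List α) (ys : List β) (f : α → β → γ)
    (h : xs.length ≤ ys.length) (da : α) (db : β) :
    (xs.zip ys).map (fun p => f p.1 p.2)
      = (List.range xs.length).map (fun j => f (xs.getD j da) (ys.getD j db)) := by
  apply List.ext_getElem
  · simp; omega
  · intro j h1 h2
    simp only [List.length_map, List.length_zip, List.length_range] at h1 h2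
    simp [List.getElem_zip, List.getD_eq_getElem?_getD,
      h2, Nat.lt_of_lt_of_le h2 h]

lemma sideB (frase : String) (h : frase.toList.length ≤ 116) :
    cifrarSolitario_alt frase = (List.range frase.toList.length).map
      (fun j => pvCharB (frase.toList.getD j ' ') (pvKS.getD j 0)) := by
  unfold cifrarSolitario_alt
  rw [PySem.List.foldl_append_singleton_eq_map, List.nil_append,
    zip_map_eq _ _ _ (by simpa [pvKS] using h) ' ' 0]

set_option maxRecDepth 10000 in
lemma abc_of_code : ∀ n ∈ List.range 91, (n = 32 ∨ (65 ≤ n ∧ n ≤ 90)) →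
    Char.ofNat n ∈ pvABC.toList := by decide

lemma mem_ABC_of_cond (ch : Char) (h : (ch == ' ' || ('A' ≤ ch && ch ≤ 'Z')) = true) :
    ch ∈ pvABC.toList := by
  simp only [Bool.or_eq_true, Bool.and_eq_true, beq_iff_eq, decide_eq_true_eq] at h
  have hn : ch.toNat = 32 ∨ (65 ≤ ch.toNat ∧ ch.toNat ≤ 90) := by
    rcases h with rfl | ⟨h1, h2⟩
    · left; rfl
    · right
      rw [Char.le_def] at h1 h2
      rw [UInt32.le_iff_toNat_le] at h1 h2
      exact ⟨h1, h2⟩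
  have hm := abc_of_code ch.toNat (List.mem_range.mpr (by omega)) hn
  rwa [Char.ofNat_toNat] at hm

-- ===== VERDICT (by name: the statement is the Claim_ definition above) =====
theorem cifrarSolitario_spec : Claim_equal_cifrarSolitario := by
  intro frase _ hpre
  obtain ⟨hlen, hmem, h10, h49, h71⟩ := hpre
  unfold Spec_cifrarSolitario
  rw [sideA frase hlen, sideB frase hlen]
  apply List.map_congr_left
  intro j hj
  rw [List.mem_range] at hj
  have hj116 : j < 116 := by omega
  obtain ⟨hk1, hk27, hk27j⟩ := ksFacts j (List.mem_range.mpr hj116)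
  set k := pvKS.getD j 0 with hk
  set ch := frase.toList.getD j ' ' with hch
  have hchm : ch ∈ pvABC.toList := by
    apply mem_ABC_of_cond
    rw [List.all_eq_true] at hmem
    apply hmem
    rw [hch, List.getD_eq_getElem?_getD, List.getElem?_eq_getElem hj]
    exact List.getElem_mem hj
  have hkm : k = ((k - 1).toNat : Int) + 1 := by omega
  rw [hkm]
  apply pointwise ch hchm (k - 1).toNat (List.mem_range.mpr (by omega))
  intro hz hkm26
  have hk27' : k = 27 := by omega
  have : frase.toList[j]? = some 'Z' := by
    rw [← hz, hch, List.getElem?_eq_getElem hj]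
    simp [List.getD_eq_getElem?_getD, List.getElem?_eq_getElem hj]
  rcases hk27j hk27' with rfl | rfl | rfl
  · exact h10 this
  · exact h49 this
  · exact h71 this
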